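-- pv_equiv track=rewrite | github.com/taviandir/GoogleCodeJam2019 | qualifications/problem2.py | find_possible_crossing
-- ===== SOURCE A (Python) =====
-- def find_possible_crossing(used_path):
--     cross_over = 'E' if used_path[0] == 'S' else 'S'
--     current_y = 0
--     current_x = 0
--     for idx in range(0, len(used_path)-1):
--         move = used_path[idx]
--         if move == 'S':
--             current_y += 1
--         elif move == 'E':
--             current_x += 1
--
--         # prevent out-of-bounds error with previousOk
--         if idx == 0:
--             continue
--
--         # looking for patterns "SEE" or "ESS"
--         previousOk = used_path[idx-1] != cross_over
--         currentOk = used_path[idx] == cross_over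
--         nextOk = used_path[idx+1] == cross_over
--         if previousOk and currentOk and nextOk:
--             break
--     return (current_y, current_x)
-- ===== SOURCE B (Python) =====
-- def find_possible_crossing(used_path):
--     cross_over = 'E' if used_path[0] == 'S' else 'S'
--     pos = used_path.find(cross_over * 2)
--     end = pos if pos != -1 else len(used_path) - 2
--     prefix = used_path[:end + 1]
--     return (prefix.count('S'), prefix.count('E'))
-- ===== Notes on version B (the rewrite author's own statement) =====
-- stated objective: idiomatic
-- what changed: B replaces A's index loop with running coordinates and a three-way break test by a substring search (find of the doubled crossover character) that locates the break point, followed by two count passes over the prefix.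
import Mathlib
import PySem

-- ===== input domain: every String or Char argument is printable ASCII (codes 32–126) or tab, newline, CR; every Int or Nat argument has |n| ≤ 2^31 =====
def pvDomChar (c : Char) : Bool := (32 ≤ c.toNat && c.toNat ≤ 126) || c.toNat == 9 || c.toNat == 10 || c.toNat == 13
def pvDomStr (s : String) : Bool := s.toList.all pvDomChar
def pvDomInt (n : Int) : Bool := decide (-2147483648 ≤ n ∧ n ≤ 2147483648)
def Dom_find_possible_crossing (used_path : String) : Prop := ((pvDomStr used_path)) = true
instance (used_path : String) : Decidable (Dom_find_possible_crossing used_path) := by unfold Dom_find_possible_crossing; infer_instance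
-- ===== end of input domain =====

-- B replaces A's manual coordinate-accumulating scan by a substring search for the doubled
-- crossover character plus two counting passes on the prefix (idiomatic; same cost).

-- ===== PORT A =====
-- the for-loop with break; every index the loop reads (idx-1, idx, idx+1 with 1 ≤ idx < stop = len-1)
-- is in range, so List.getD is exact for used_path[...] here
def fpcLoop (cs : List Char) (c : Char) (stop : Nat) (idx : Nat) (y x : Int) : Int × Int :=
  if h : idx < stop then
    let move := cs.getD idx ' '
    let yx := if move = 'S' then (y + 1, x) else if move = 'E' then (y, x + 1) else (y, x)
    if idx = 0 then fpcLoop cs c stop (idx + 1) yx.1 yx.2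
    else if cs.getD (idx - 1) ' ' ≠ c ∧ cs.getD idx ' ' = c ∧ cs.getD (idx + 1) ' ' = c then yx
    else fpcLoop cs c stop (idx + 1) yx.1 yx.2
  else (y, x)
  termination_by stop - idx
  decreasing_by all_goals omega

def find_possible_crossing (used_path : String) : Int × Int :=
  let cs := used_path.toList
  -- used_path[0]: Pre_ guarantees the string is nonempty, so getD is exact
  let cross_over := if cs.getD 0 ' ' = 'S' then 'E' else 'S'
  fpcLoop cs cross_over (cs.length - 1) 0 0 0

-- ===== PORT B =====
def find_possible_crossing_alt (used_path : String) : Int × Int :=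
  let cs := used_path.toList
  let cross_over := if cs.getD 0 ' ' = 'S' then 'E' else 'S'
  let pos := PySem.Chars.find cs [cross_over, cross_over]
  let e : Int := if pos ≠ -1 then pos else (cs.length : Int) - 2
  let pre := PySem.Chars.slice cs none (some (e + 1))
  ((PySem.Chars.count pre ['S'] : Int), (PySem.Chars.count pre ['E'] : Int))

-- ===== PRECONDITION & SPEC =====
-- Pre_ excludes only the empty string, on which A raises IndexError at used_path[0] (B raises too)
def Pre_find_possible_crossing (used_path : String) : Prop := used_path ≠ ""
instance (used_path : String) : Decidable (Pre_find_possible_crossing used_path) := by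
  unfold Pre_find_possible_crossing; infer_instance
def pvWitness_find_possible_crossing : String := "SSEES"

def Spec_find_possible_crossing (used_path : String) (out : Int × Int) : Prop :=
  out = find_possible_crossing_alt used_path
instance (used_path : String) (out : Int × Int) : Decidable (Spec_find_possible_crossing used_path out) := by
  unfold Spec_find_possible_crossing; infer_instance

-- ===== CLAIM (what is proved, stated in full; the proofs are below) =====
def Claim_equal_find_possible_crossing : Prop := ∀ (used_path : String),
  Dom_find_possible_crossing used_path → Pre_find_possible_crossing used_path →
  Spec_find_possible_crossing used_path (find_possible_crossing used_path)

-- ===== LEMMAS AND PROOFS =====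

-- the break condition of A's loop, as a predicate on the index
def fpcBrk (cs : List Char) (c : Char) (q : Nat) : Prop :=
  cs.getD (q - 1) ' ' ≠ c ∧ cs.getD q ' ' = c ∧ cs.getD (q + 1) ' ' = c

-- Python's str.count with a single-character needle is List.count
theorem chars_count_go_single (a : Char) :
    ∀ (fuel : Nat) (l : List Char) (acc : Nat), l.length ≤ fuel →
      PySem.Chars.count.go [a] fuel l acc = acc + l.count a := by
  intro fuel
  induction fuel with
  | zero => intro l acc h; cases l with
    | nil => simp [PySem.Chars.count.go]
    | cons b t => simp at h
  | succ f ih =>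
    intro l acc h
    cases l with
    | nil => simp [PySem.Chars.count.go]
    | cons b t =>
      simp only [PySem.Chars.count.go, List.isPrefixOf_cons₂, List.isPrefixOf_nil_left,
        Bool.and_true]
      by_cases hb : a = b
      · subst hb
        simp only [beq_self_eq_true, if_pos]
        rw [List.length_singleton, List.drop_one, List.tail_cons,
          ih t (acc + 1) (by simpa using h)]
        simp
        omega
      · have : (a == b) = false := beq_eq_false_iff_ne.mpr hb
        rw [this]
        simp only [Bool.false_eq_true, if_false]
        rw [ih t acc (by simpa using h)]
        simp [Ne.symm hb]

theorem chars_count_single (cs : List Char) (a : Char) :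
    PySem.Chars.count cs [a] = cs.count a := by
  simp only [PySem.Chars.count, List.isEmpty_cons, Bool.false_eq_true, if_false]
  rw [chars_count_go_single a cs.length cs 0 le_rfl]
  omega

-- the loop, when no break condition holds in [idx, stop), counts S and E over the rest
theorem fpcLoop_no_break (cs : List Char) (c : Char) (stop : Nat) (hstop : stop ≤ cs.length) :
    ∀ (k idx : Nat) (y x : Int), stop - idx = k →
      (∀ q, idx ≤ q → q < stop → ¬ fpcBrk cs c q) →
      fpcLoop cs c stop idx y x =
        (y + (((cs.drop idx).take (stop - idx)).count 'S' : Int),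
         x + (((cs.drop idx).take (stop - idx)).count 'E' : Int)) := by
  intro k
  induction k with
  | zero =>
    intro idx y x hk _
    rw [fpcLoop]
    simp [Nat.not_lt.mpr (Nat.le_of_sub_eq_zero hk), hk]
  | succ m ih =>
    intro idx y x hk hnb
    have hlt : idx < stop := by omega
    have hltn : idx < cs.length := lt_of_lt_of_le hlt hstop
    have hdrop : cs.drop idx = cs[idx] :: cs.drop (idx + 1) := List.drop_eq_getElem_cons hltn
    have hget : cs.getD idx ' ' = cs[idx] := List.getD_eq_getElem cs ' ' hltn
    have hrec : fpcLoop cs c stop (idx + 1)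
        (if cs.getD idx ' ' = 'S' then (y + 1, x) else if cs.getD idx ' ' = 'E' then (y, x + 1) else (y, x)).1
        (if cs.getD idx ' ' = 'S' then (y + 1, x) else if cs.getD idx ' ' = 'E' then (y, x + 1) else (y, x)).2 =
        (y + (((cs.drop idx).take (stop - idx)).count 'S' : Int),
         x + (((cs.drop idx).take (stop - idx)).count 'E' : Int)) := by
      rw [ih (idx + 1) _ _ (by omega) (fun q h1 h2 => hnb q (by omega) h2)]
      rw [hdrop]
      have hs : stop - idx = (stop - (idx + 1)) + 1 := by omega
      rw [hs, List.take_succ_cons, List.count_cons, List.count_cons, hget]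
      by_cases h1 : cs[idx] = 'S'
      · apply Prod.ext <;> simp [h1] <;> omega
      · by_cases h2 : cs[idx] = 'E'
        · apply Prod.ext <;> simp [h2] <;> omega
        · apply Prod.ext <;> simp [h1, h2]
    rw [fpcLoop]
    simp only [hlt, dif_pos]
    by_cases h0 : idx = 0
    · subst h0; rw [if_pos rfl]; exact hrec
    · have hnb' : ¬ (cs.getD (idx - 1) ' ' ≠ c ∧ cs.getD idx ' ' = c ∧ cs.getD (idx + 1) ' ' = c) :=
        hnb idx le_rfl hlt
      rw [if_neg h0, if_neg hnb']
      exact hrec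

-- the loop, when the first break index ≥ idx is p, counts S and E over [idx, p]
theorem fpcLoop_break (cs : List Char) (c : Char) (stop : Nat) (hstop : stop ≤ cs.length)
    (p : Nat) (hbp : fpcBrk cs c p) (hps : p < stop) :
    ∀ (k idx : Nat) (y x : Int), p - idx = k → idx ≤ p →
      (∀ q, idx ≤ q → q < p → ¬ fpcBrk cs c q) →
      fpcLoop cs c stop idx y x =
        (y + (((cs.drop idx).take (p + 1 - idx)).count 'S' : Int),
         x + (((cs.drop idx).take (p + 1 - idx)).count 'E' : Int)) := by
  intro k
  induction k with
  | zero =>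
    intro idx y x hk hip _
    have hip' : idx = p := by omega
    subst hip'
    have h0 : idx ≠ 0 := by
      intro h; rw [h] at hbp
      exact hbp.1 (by simpa using hbp.2.1)
    have hltn : idx < cs.length := lt_of_lt_of_le hps hstop
    have hdrop : cs.drop idx = cs[idx] :: cs.drop (idx + 1) := List.drop_eq_getElem_cons hltn
    have hget : cs.getD idx ' ' = cs[idx] := List.getD_eq_getElem cs ' ' hltn
    have hbp' : cs.getD (idx - 1) ' ' ≠ c ∧ cs.getD idx ' ' = c ∧ cs.getD (idx + 1) ' ' = c := hbp
    rw [fpcLoop]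
    simp only [hps, dif_pos, h0, if_false]
    rw [if_pos hbp']
    have ht : idx + 1 - idx = 1 := by omega
    rw [hdrop, ht, List.take_succ_cons, List.take_zero, hget]
    by_cases h1 : cs[idx] = 'S'
    · simp [h1]
    · by_cases h2 : cs[idx] = 'E'
      · simp [h2]
      · simp [h1, h2]
  | succ m ih =>
    intro idx y x hk hip hnb
    have hlt : idx < stop := by omega
    have hltn : idx < cs.length := lt_of_lt_of_le hlt hstop
    have hdrop : cs.drop idx = cs[idx] :: cs.drop (idx + 1) := List.drop_eq_getElem_cons hltn
    have hget : cs.getD idx ' ' = cs[idx] := List.getD_eq_getElem cs ' ' hltn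
    have hrec : fpcLoop cs c stop (idx + 1)
        (if cs.getD idx ' ' = 'S' then (y + 1, x) else if cs.getD idx ' ' = 'E' then (y, x + 1) else (y, x)).1
        (if cs.getD idx ' ' = 'S' then (y + 1, x) else if cs.getD idx ' ' = 'E' then (y, x + 1) else (y, x)).2 =
        (y + (((cs.drop idx).take (p + 1 - idx)).count 'S' : Int),
         x + (((cs.drop idx).take (p + 1 - idx)).count 'E' : Int)) := by
      rw [ih (idx + 1) _ _ (by omega) (by omega) (fun q h1 h2 => hnb q (by omega) h2)]
      rw [hdrop]
      have hs : p + 1 - idx = (p + 1 - (idx + 1)) + 1 := by omega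
      rw [hs, List.take_succ_cons, List.count_cons, List.count_cons, hget]
      by_cases h1 : cs[idx] = 'S'
      · apply Prod.ext <;> simp [h1] <;> omega
      · by_cases h2 : cs[idx] = 'E'
        · apply Prod.ext <;> simp [h2] <;> omega
        · apply Prod.ext <;> simp [h1, h2]
    rw [fpcLoop]
    simp only [hlt, dif_pos]
    by_cases h0 : idx = 0
    · subst h0; rw [if_pos rfl]; exact hrec
    · have hnb' : ¬ (cs.getD (idx - 1) ' ' ≠ c ∧ cs.getD idx ' ' = c ∧ cs.getD (idx + 1) ' ' = c) :=
        hnb idx le_rfl (by omega)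
      rw [if_neg h0, if_neg hnb']
      exact hrec

-- a break index exhibits an occurrence of [c,c] (needed both ways)
theorem brk_to_prefix (cs : List Char) (c : Char) (hc : c = 'S' ∨ c = 'E') (q : Nat)
    (hb : fpcBrk cs c q) : q + 1 < cs.length ∧ [c, c] <+: cs.drop q := by
  have hsp : (' ' : Char) ≠ c := by rcases hc with h | h <;> simp [h]
  have hq1 : q + 1 < cs.length := by
    by_contra h
    have : cs.getD (q + 1) ' ' = ' ' := List.getD_eq_default cs ' ' (by omega)
    exact hsp (this ▸ hb.2.2)
  have hq : q < cs.length := by omega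
  have h1 : cs[q] = c := by rw [← List.getD_eq_getElem cs ' ' hq]; exact hb.2.1
  have h2 : cs[q + 1] = c := by rw [← List.getD_eq_getElem cs ' ' hq1]; exact hb.2.2
  refine ⟨hq1, ?_⟩
  rw [List.drop_eq_getElem_cons hq, List.drop_eq_getElem_cons hq1, h1, h2]
  exact ⟨_, rfl⟩

theorem occ_prefix (cs : List Char) (c : Char) (q : Nat) (hq : q + 1 < cs.length)
    (h1 : cs[q]'(by omega) = c) (h2 : cs[q + 1]'hq = c) : [c, c] <+: cs.drop q := by
  rw [List.drop_eq_getElem_cons (by omega : q < cs.length), List.drop_eq_getElem_cons hq, h1, h2]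
  exact ⟨_, rfl⟩

theorem find_possible_crossing_eq (used_path : String)
    (hne : used_path ≠ "") :
    find_possible_crossing used_path = find_possible_crossing_alt used_path := by
  unfold find_possible_crossing find_possible_crossing_alt
  dsimp only
  set cs := used_path.toList with hcs
  have hcs0 : cs ≠ [] := fun h => hne (String.toList_inj.mp (by simp [hcs] at h ⊢; exact h))
  have hlen : 1 ≤ cs.length := List.length_pos_iff.mpr hcs0
  set c : Char := if cs.getD 0 ' ' = 'S' then 'E' else 'S' with hc
  have hcse : c = 'S' ∨ c = 'E' := by rw [hc]; split <;> simp
  have hc0 : cs.getD 0 ' ' ≠ c := by rw [hc]; split <;> simp_all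
  have hstop : cs.length - 1 ≤ cs.length := by omega
  have hfind := PySem.Chars.neg_one_le_find cs [c, c]
  by_cases hpos : PySem.Chars.find cs [c, c] = -1
  · -- no occurrence of the doubled crossover: A runs to completion, B counts cs[:len-1]
    have hnocc : ¬ [c, c] <:+: cs := (PySem.Chars.find_eq_neg_one_iff cs [c, c]).mp hpos
    have hnb : ∀ q, 0 ≤ q → q < cs.length - 1 → ¬ fpcBrk cs c q := by
      intro q _ _ hb
      obtain ⟨hq1, hpfx⟩ := brk_to_prefix cs c hcse q hb
      exact hnocc (hpfx.isInfix.trans (cs.drop_suffix q).isInfix)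
    rw [fpcLoop_no_break cs c (cs.length - 1) hstop (cs.length - 1) 0 0 0 (by omega) hnb]
    simp only [hpos, ne_eq, not_true_eq_false, if_false]
    have he : ((cs.length : Int) - 2) + 1 = ((cs.length - 1 : Nat) : Int) := by omega
    rw [he, PySem.Chars.slice_eq_listSlice, PySem.List.slice_to _ _, Int.toNat_natCast,
      chars_count_single, chars_count_single]
    · simp
    · positivity
  · -- first occurrence at p = find: A breaks exactly there, B counts cs[:p+1]
    have hge : 0 ≤ PySem.Chars.find cs [c, c] := by omega
    obtain ⟨hpfx, hmin⟩ := PySem.Chars.find_spec hge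
    obtain ⟨p, hp⟩ : ∃ p : Nat, (PySem.Chars.find cs [c, c]).toNat = p := ⟨_, rfl⟩
    rw [hp] at hpfx hmin
    have hplen : p + 2 ≤ cs.length := by
      have h2 : 2 ≤ cs.length - p := by simpa using hpfx.length_le
      omega
    obtain ⟨t, ht⟩ := hpfx
    have h1 : cs[p]'(by omega) :: cs.drop (p + 1) = c :: c :: t := by
      rw [← List.drop_eq_getElem_cons (by omega)]; rw [← ht]; rfl
    obtain ⟨hcp, hrest⟩ := List.cons_eq_cons.mp h1
    have h2 : cs[p + 1]'(by omega) :: cs.drop (p + 2) = c :: t := by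
      rw [← List.drop_eq_getElem_cons (by omega)]; exact hrest
    obtain ⟨hcp1, -⟩ := List.cons_eq_cons.mp h2
    have hp1 : 1 ≤ p := by
      by_contra h
      have h0 : p = 0 := by omega
      subst h0
      exact hc0 (by rw [List.getD_eq_getElem cs ' ' (by omega)]; exact hcp)
    have hbrkp : fpcBrk cs c p := by
      refine ⟨?_, ?_, ?_⟩
      · intro hcontra
        have hq : (p - 1) + 1 < cs.length := by omega
        have hg1 : cs[p - 1]'(by omega) = c := by
          rw [← List.getD_eq_getElem cs ' ' (by omega)]; exact hcontra
        have hg2 : cs[(p - 1) + 1]'hq = c := by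
          have hpe : (p - 1) + 1 = p := by omega
          simp_rw [hpe]; exact hcp
        exact hmin (p - 1) (by omega) (occ_prefix cs c (p - 1) hq hg1 hg2)
      · rw [List.getD_eq_getElem cs ' ' (by omega)]; exact hcp
      · rw [List.getD_eq_getElem cs ' ' (by omega)]; exact hcp1
    have hnb : ∀ q, 0 ≤ q → q < p → ¬ fpcBrk cs c q := by
      intro q _ hq hb
      obtain ⟨hq1, hpfx'⟩ := brk_to_prefix cs c hcse q hb
      exact hmin q hq hpfx'
    rw [fpcLoop_break cs c (cs.length - 1) hstop p hbrkp (by omega) p 0 0 0 (by omega)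
      (by omega) hnb]
    simp only [hpos, ne_eq, not_false_eq_true, if_true]
    have he : PySem.Chars.find cs [c, c] + 1 = ((p + 1 : Nat) : Int) := by push_cast; omega
    rw [he, PySem.Chars.slice_eq_listSlice, PySem.List.slice_to _ _, Int.toNat_natCast,
      chars_count_single, chars_count_single]
    · simp
    · positivity

-- ===== VERDICT (by name: the statement is the Claim_ definition above) =====
theorem find_possible_crossing_spec : Claim_equal_find_possible_crossing := by
  intro used_path _ hpre
  unfold Spec_find_possible_crossing
  exact find_possible_crossing_eq used_path hpre
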